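-- pv_equiv track=rewrite | github.com/vishwanatham/Learning | Python/NPTEL/Week - 3/Assignment.py | accordian
-- ===== SOURCE A (Python) =====
-- def accordian(l):
--     prevdiff = 0
--     id = ''
--     for i in range(0, len(l)-1):
--         diff = abs(l[i] - l[i+1])
--         if i > 0:
--             if prevdiff > diff and (id == '' or id == 'i'):
--                 id = 'd'
--             elif prevdiff < diff and (id == '' or id == 'd'):
--                 id = 'i'
--             else:
--                 return False
--         prevdiff = diff
--     return True
-- ===== SOURCE B (Python) =====
-- def accordian(l):
--     diffs = [abs(l[i] - l[i + 1]) for i in range(len(l) - 1)]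
--     signs = [(d2 > d1) - (d2 < d1) for d1, d2 in zip(diffs, diffs[1:])]
--     return all(s != 0 for s in signs) and all(a == -b for a, b in zip(signs, signs[1:]))
-- ===== Notes on version B (the rewrite author's own statement) =====
-- stated objective: simpler
-- what changed: Replaces A's single index loop carrying prevdiff and an 'i'/'d' direction flag with early returns by first materialising the list of adjacent absolute differences, then checking its sign sequence (computed via zips) is everywhere nonzero and strictly alternating.
import Mathlib
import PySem

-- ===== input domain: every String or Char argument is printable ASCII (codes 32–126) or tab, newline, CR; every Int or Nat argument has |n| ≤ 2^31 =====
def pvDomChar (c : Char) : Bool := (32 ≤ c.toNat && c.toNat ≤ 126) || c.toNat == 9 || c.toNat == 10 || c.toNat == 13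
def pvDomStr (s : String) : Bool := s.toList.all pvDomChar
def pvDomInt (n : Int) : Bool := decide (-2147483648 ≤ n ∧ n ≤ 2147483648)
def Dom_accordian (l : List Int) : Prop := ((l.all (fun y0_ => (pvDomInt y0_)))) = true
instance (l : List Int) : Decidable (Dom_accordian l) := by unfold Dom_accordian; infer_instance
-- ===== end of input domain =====

-- B replaces A's stateful index loop (prevdiff + 'i'/'d' flag with early return) by building the
-- list of adjacent absolute differences and checking its sign sequence is nonzero and alternating
-- (objective: simpler decomposition, same cost).


-- ===== PORT A =====
-- A's for-loop over i ∈ range(0, len(l)-1) with state (prevdiff, id) and early `return False`;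
-- encoded structurally with a fuel counter ≥ the number of remaining iterations.
def accordianGo (l : List Int) : Nat → Nat → Int → String → Bool
  | 0, _, _, _ => true
  | fuel + 1, i, prevdiff, id =>
    if i < l.length - 1 then
      let diff := |l.getD i 0 - l.getD (i + 1) 0|
      if i > 0 then
        if prevdiff > diff ∧ (id = "" ∨ id = "i") then accordianGo l fuel (i + 1) diff "d"
        else if prevdiff < diff ∧ (id = "" ∨ id = "d") then accordianGo l fuel (i + 1) diff "i"
        else false
      else accordianGo l fuel (i + 1) diff id
    else true

def accordian (l : List Int) : Bool := accordianGo l l.length 0 0 ""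

-- ===== PORT B =====
-- sign of d2 - d1, written as in Source B: (d2 > d1) - (d2 < d1)
def pvSgn (d1 d2 : Int) : Int := (if d2 > d1 then 1 else 0) - (if d2 < d1 then 1 else 0)

def accordian_alt (l : List Int) : Bool :=
  let diffs := (List.range (l.length - 1)).map (fun i => |l.getD i 0 - l.getD (i + 1) 0|)
  let signs := (diffs.zip diffs.tail).map (fun p => pvSgn p.1 p.2)
  (signs.all (fun s => s ≠ 0)) && ((signs.zip signs.tail).all (fun p => p.1 = -p.2))

-- ===== PRECONDITION & SPEC =====
def Spec_accordian (l : List Int) (out : Bool) : Prop := out = accordian_alt l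
instance (l : List Int) (out : Bool) : Decidable (Spec_accordian l out) := by unfold Spec_accordian; infer_instance

-- ===== CLAIM (what is proved, stated in full; the proofs are below) =====
def Claim_equal_accordian : Prop := ∀ (l : List Int), Dom_accordian l → Spec_accordian l (accordian l)

-- ===== LEMMAS AND PROOFS =====

-- A's loop from index ≥ 1, re-expressed on the list of remaining diffs
def loopD : List Int → Int → String → Bool
  | [], _, _ => true
  | d :: ds, p, id =>
    if p > d ∧ (id = "" ∨ id = "i") then loopD ds d "d"
    else if p < d ∧ (id = "" ∨ id = "d") then loopD ds d "i"
    else false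

-- B's check, re-expressed recursively: prev sign s (nonzero), prev diff p
def zigD : Int → Int → List Int → Bool
  | _, _, [] => true
  | s, p, d :: ds => (pvSgn p d ≠ 0 && pvSgn p d = -s) && zigD (pvSgn p d) d ds

def checkD (L : List Int) : Bool :=
  let signs := (L.zip L.tail).map (fun p => pvSgn p.1 p.2)
  (signs.all (fun s => s ≠ 0)) && ((signs.zip signs.tail).all (fun p => p.1 = -p.2))

def pvDiffs (l : List Int) : List Int :=
  (List.range (l.length - 1)).map (fun i => |l.getD i 0 - l.getD (i + 1) 0|)

theorem checkD_cons_cons (p d : Int) (ds : List Int) :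
    checkD (p :: d :: ds) = ((pvSgn p d ≠ 0) && zigD (pvSgn p d) d ds) := by
  induction ds generalizing p d with
  | nil => simp [checkD, zigD]
  | cons e es ih =>
    have h := ih d e
    have hsym : (pvSgn p d = -pvSgn d e) ↔ (pvSgn d e = -pvSgn p d) := by
      constructor <;> (intro; omega)
    simp only [checkD, zigD, List.zip, List.zipWith_cons_cons, List.map_cons, List.all_cons,
      List.tail_cons, hsym] at h ⊢
    cases hz : decide (pvSgn d e ≠ 0) <;> cases hz2 : decide (pvSgn d e = -pvSgn p d) <;>
      simp_all

theorem loopD_zig (ds : List Int) (p : Int) :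
    loopD ds p "i" = zigD 1 p ds ∧ loopD ds p "d" = zigD (-1) p ds := by
  induction ds generalizing p with
  | nil => simp [loopD, zigD]
  | cons d rest ih =>
    constructor <;> (
      simp only [loopD, zigD]
      rcases lt_trichotomy p d with h | h | h
      · simp only [pvSgn] at *
        simp [h, not_lt.mpr (le_of_lt h), (ih d).1]
      · simp [pvSgn, h]
      · simp only [pvSgn] at *
        simp [h, not_lt.mpr (le_of_lt h), (ih d).2])

theorem loopD_empty (ds : List Int) (p : Int) :
    loopD ds p "" = checkD (p :: ds) := by
  cases ds with
  | nil => simp [loopD, checkD]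
  | cons d rest =>
    rw [checkD_cons_cons]
    simp only [loopD]
    rcases lt_trichotomy p d with h | h | h
    · simp [pvSgn, h, not_lt.mpr (le_of_lt h), (loopD_zig rest d).1]
    · simp [h, pvSgn]
    · simp [pvSgn, h, not_lt.mpr (le_of_lt h), (loopD_zig rest d).2]

theorem pvDiffs_drop (l : List Int) (i : Nat) (h : i < l.length - 1) :
    (pvDiffs l).drop i = |l.getD i 0 - l.getD (i + 1) 0| :: (pvDiffs l).drop (i + 1) := by
  have hi : i < (pvDiffs l).length := by simp [pvDiffs]; omega
  rw [List.drop_eq_getElem_cons hi]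
  congr 1
  simp [pvDiffs]

theorem accordianGo_loopD (l : List Int) (fuel : Nat) : ∀ (i : Nat), 1 ≤ i →
    l.length - 1 - i ≤ fuel → ∀ (p : Int) (id : String),
    accordianGo l fuel i p id = loopD ((pvDiffs l).drop i) p id := by
  induction fuel with
  | zero =>
    intro i hi hf p id
    have : (pvDiffs l).drop i = [] := by
      apply List.drop_eq_nil_of_le; simp [pvDiffs]; omega
    simp [accordianGo, this, loopD]
  | succ fuel ih =>
    intro i hi hf p id
    by_cases h : i < l.length - 1
    · rw [pvDiffs_drop l i h]
      rw [accordianGo]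
      simp only [h, if_true, show i > 0 by omega, if_true]
      have := ih (i + 1) (by omega) (by omega)
      simp only [loopD]
      split_ifs with h1 h2 <;> simp [this]
    · rw [accordianGo]
      have : (pvDiffs l).drop i = [] := by
        apply List.drop_eq_nil_of_le; simp [pvDiffs]; omega
      simp [h, this, loopD]

-- ===== VERDICT (by name: the statement is the Claim_ definition above) =====
theorem accordian_spec : Claim_equal_accordian := by
  intro l _
  unfold Spec_accordian accordian accordian_alt
  rw [show ((List.range (l.length - 1)).map (fun i => |l.getD i 0 - l.getD (i + 1) 0|)) = pvDiffs l from rfl]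
  by_cases h : 0 < l.length - 1
  · obtain ⟨m, hm⟩ : ∃ m, l.length = m + 1 := ⟨l.length - 1, by omega⟩
    rw [hm]
    rw [accordianGo]
    simp only [h, if_true, show ¬ (0 > 0) by omega, if_false]
    rw [accordianGo_loopD l m 1 (by omega) (by omega), loopD_empty]
    rw [show checkD = (fun L => ((L.zip L.tail).map (fun p => pvSgn p.1 p.2)).all (fun s => s ≠ 0) &&
      (((L.zip L.tail).map (fun p => pvSgn p.1 p.2)).zip ((L.zip L.tail).map (fun p => pvSgn p.1 p.2)).tail).all (fun p => p.1 = -p.2)) from rfl]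
    congr 1
    have h0 := pvDiffs_drop l 0 h
    simp only [List.drop_zero] at h0
    exact h0.symm
  · have hd : pvDiffs l = [] := by simp [pvDiffs]; omega
    cases hl : l.length with
    | zero => simp [accordianGo, hd]
    | succ m => rw [accordianGo]; simp [show ¬ (0 < l.length - 1) from h, hd]
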